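-- pv_equiv track=rewrite | github.com/SimCini/python | Ciniltani_vendite.py | venditaMinA
-- ===== SOURCE A (Python) =====
-- def venditaMinA(tVendite):
--     importiA = []
--     prodottiMin=[]
--     for (reparto,categoria),(prodotto,(tipPagamento,importo)) in tVendite:
--         if reparto=="RepartoA":
--             importiA.append(importo)
--     impMinA = min(importiA)
--     for (reparto,categoria),(prodotto,(tipPagamento,importo)) in tVendite:
--         if importo==impMinA:
--             prodottiMin.append(prodotto)
--     return (impMinA,(prodottiMin))
-- ===== SOURCE B (Python) =====
-- def venditaMinA(tVendite):
--     # One pass: group prodotti by importo in a dict and track the RepartoA minimum.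
--     index = {}
--     impMinA = None
--     for (reparto, categoria), (prodotto, (tipPagamento, importo)) in tVendite:
--         index.setdefault(importo, []).append(prodotto)
--         if reparto == "RepartoA" and (impMinA is None or importo < impMinA):
--             impMinA = importo
--     return (impMinA, index[impMinA])
-- ===== Notes on version B (the rewrite author's own statement) =====
-- stated objective: idiomatic
-- what changed: Replaces A's two full scans (collect RepartoA importi then rescan for matching products) by a single pass that groups products by importo in a dict while tracking the RepartoA minimum, finishing with one dict lookup.
import Mathlib
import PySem

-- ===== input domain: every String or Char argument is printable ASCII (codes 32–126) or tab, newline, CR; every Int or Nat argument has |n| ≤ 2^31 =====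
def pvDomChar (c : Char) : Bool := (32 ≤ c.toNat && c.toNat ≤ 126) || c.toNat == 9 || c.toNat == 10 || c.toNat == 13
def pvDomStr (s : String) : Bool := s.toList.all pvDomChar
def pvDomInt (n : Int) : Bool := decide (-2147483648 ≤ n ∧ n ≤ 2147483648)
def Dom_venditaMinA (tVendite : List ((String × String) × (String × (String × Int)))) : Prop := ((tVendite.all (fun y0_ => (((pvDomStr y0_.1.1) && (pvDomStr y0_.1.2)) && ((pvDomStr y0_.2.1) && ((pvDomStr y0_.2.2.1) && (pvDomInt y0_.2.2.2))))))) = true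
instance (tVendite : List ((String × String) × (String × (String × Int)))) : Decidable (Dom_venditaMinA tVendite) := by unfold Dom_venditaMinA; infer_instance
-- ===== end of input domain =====

-- B: one pass grouping products by importo in a dict while tracking the RepartoA minimum,
-- then a single dict lookup — instead of A's two full scans.  Objective: idiomatic.

-- ===== PORT A =====
def venditaMinA (tVendite : List ((String × String) × (String × (String × Int)))) : Int × List String :=
  let importiA := tVendite.foldl
    (fun acc e => if e.1.1 == "RepartoA" then acc ++ [e.2.2.2] else acc) []
  -- min(importiA): raises ValueError on []; Pre_venditaMinA excludes that, .getD 0 is never hit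
  let impMinA := (PySem.List.min? importiA (fun x => x)).getD 0
  let prodottiMin := tVendite.foldl
    (fun acc e => if e.2.2.2 == impMinA then acc ++ [e.2.1] else acc) []
  (impMinA, prodottiMin)

-- ===== PORT B =====
def venditaMinA_alt (tVendite : List ((String × String) × (String × (String × Int)))) : Int × List String :=
  let st := tVendite.foldl
    (fun (p : PySem.Dict Int (List String) × Option Int) e =>
      (p.1.modify e.2.2.2 [] (· ++ [e.2.1]),
       if e.1.1 == "RepartoA" then
         match p.2 with
         | none => some e.2.2.2
         | some m => if e.2.2.2 < m then some e.2.2.2 else some m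
       else p.2))
    (PySem.Dict.empty, none)
  -- impMinA is None / index[None] raises KeyError only when no RepartoA entry; Pre_ excludes that
  let m := st.2.getD 0
  (m, st.1.getD m [])

-- ===== PRECONDITION & SPEC =====
-- Pre_ excludes exactly the inputs with no RepartoA entry, on which A raises ValueError (min of []).
def Pre_venditaMinA (tVendite : List ((String × String) × (String × (String × Int)))) : Prop :=
  (tVendite.any (fun e => e.1.1 == "RepartoA")) = true
instance (tVendite : List ((String × String) × (String × (String × Int)))) : Decidable (Pre_venditaMinA tVendite) := by unfold Pre_venditaMinA; infer_instance
def pvWitness_venditaMinA : (List ((String × String) × (String × (String × Int)))) :=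
  [(("RepartoA", "cat"), ("pane", ("cash", 3))), (("RepartoB", "cat"), ("latte", ("card", 3)))]
def Spec_venditaMinA (tVendite : List ((String × String) × (String × (String × Int)))) (out : Int × List String) : Prop := out = venditaMinA_alt tVendite
instance (tVendite : List ((String × String) × (String × (String × Int)))) (out : Int × List String) : Decidable (Spec_venditaMinA tVendite out) := by unfold Spec_venditaMinA; infer_instance

-- ===== CLAIM (what is proved, stated in full; the proofs are below) =====
def Claim_equal_venditaMinA : Prop := ∀ (tVendite : List ((String × String) × (String × (String × Int)))), Dom_venditaMinA tVendite → Pre_venditaMinA tVendite → Spec_venditaMinA tVendite (venditaMinA tVendite)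

-- ===== LEMMAS AND PROOFS =====

-- A fold with two independent accumulators is the pair of the two folds.
theorem pairFold (l : List ((String × String) × (String × (String × Int))))
    (d : PySem.Dict Int (List String)) (o : Option Int) :
    l.foldl
      (fun (p : PySem.Dict Int (List String) × Option Int) e =>
        (p.1.modify e.2.2.2 [] (· ++ [e.2.1]),
         if e.1.1 == "RepartoA" then
           match p.2 with
           | none => some e.2.2.2
           | some m => if e.2.2.2 < m then some e.2.2.2 else some m
         else p.2)) (d, o)
    = (l.foldl (fun d e => d.modify e.2.2.2 [] (· ++ [e.2.1])) d,
       l.foldl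
         (fun (o : Option Int) e =>
           if e.1.1 == "RepartoA" then
             match o with
             | none => some e.2.2.2
             | some m => if e.2.2.2 < m then some e.2.2.2 else some m
           else o) o) := by
  induction l generalizing d o with
  | nil => rfl
  | cons e t ih =>
    rw [List.foldl_cons, List.foldl_cons, List.foldl_cons]
    exact ih _ _

-- B's running-minimum loop is the Option-valued fold of `min` over the RepartoA importi.
theorem minLoop_eq (l : List ((String × String) × (String × (String × Int)))) (o : Option Int) :
    l.foldl
      (fun (o : Option Int) e =>
        if e.1.1 == "RepartoA" then
          match o with
          | none => some e.2.2.2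
          | some m => if e.2.2.2 < m then some e.2.2.2 else some m
        else o) o
    = ((l.filter (fun e => e.1.1 == "RepartoA")).map (fun e => e.2.2.2)).foldl
        (fun (o : Option Int) x =>
          match o with
          | none => some x
          | some m => some (min m x)) o := by
  induction l generalizing o with
  | nil => rfl
  | cons e t ih =>
    by_cases h : (e.1.1 == "RepartoA") = true
    · conv_rhs => rw [List.filter_cons, if_pos h, List.map_cons, List.foldl_cons]
      rw [List.foldl_cons, ih, if_pos h]
      cases o with
      | none => rfl
      | some m =>
        show List.foldl _ (if e.2.2.2 < m then some e.2.2.2 else some m) _ =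
             List.foldl _ (some (min m e.2.2.2)) _
        by_cases hx : e.2.2.2 < m
        · rw [if_pos hx, min_eq_right (le_of_lt hx)]
        · rw [if_neg hx, min_eq_left (by omega)]
    · conv_rhs => rw [List.filter_cons, if_neg h]
      rw [List.foldl_cons, ih, if_neg h]

-- The Option-min fold started from `some m` computes the plain running min.
theorem foldl_optMin_some (xs : List Int) (m : Int) :
    xs.foldl
      (fun (o : Option Int) x =>
        match o with
        | none => some x
        | some m => some (min m x)) (some m) = some (xs.foldl min m) := by
  induction xs generalizing m with
  | nil => rfl
  | cons x t ih => simp [List.foldl_cons, ih]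

-- So on a nonempty list it agrees with Python's min().
theorem foldl_optMin_eq_min? (xs : List Int) (hxs : xs ≠ []) :
    xs.foldl
      (fun (o : Option Int) x =>
        match o with
        | none => some x
        | some m => some (min m x)) none = PySem.List.min? xs (fun x => x) := by
  cases xs with
  | nil => exact absurd rfl hxs
  | cons x t =>
    rw [PySem.List.min?_id_cons]
    simp only [List.foldl_cons]
    exact foldl_optMin_some t x

theorem venditaMinA_spec' (tVendite : List ((String × String) × (String × (String × Int))))
    (hpre : Pre_venditaMinA tVendite) :
    venditaMinA tVendite = venditaMinA_alt tVendite := by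
  simp only [venditaMinA, venditaMinA_alt]
  rw [pairFold]
  simp only [minLoop_eq, PySem.List.foldl_append_if]
  -- the RepartoA importi list is nonempty under Pre_
  have hne : (tVendite.filter (fun e => e.1.1 == "RepartoA")).map (fun e => e.2.2.2) ≠ [] := by
    simp only [ne_eq, List.map_eq_nil_iff, List.filter_eq_nil_iff]
    intro h
    unfold Pre_venditaMinA at hpre
    rw [List.any_eq_true] at hpre
    obtain ⟨e, he, hrep⟩ := hpre
    exact h e he hrep
  rw [foldl_optMin_eq_min? _ hne]
  simp only [List.nil_append]
  congr 1
  -- products: dict grouping lookup = A's filtered scan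
  have hfold :
      tVendite.foldl (fun (d : PySem.Dict Int (List String)) e => d.modify e.2.2.2 [] (· ++ [e.2.1]))
        PySem.Dict.empty
      = (tVendite.map (fun e => (e.2.2.2, e.2.1))).foldl
          (fun (d : PySem.Dict Int (List String)) p => d.modify p.1 [] (· ++ [p.2]))
          PySem.Dict.empty := by
    rw [List.foldl_map]
  rw [hfold, PySem.Dict.getD_foldl_modify_append, PySem.Dict.getD_empty, List.nil_append,
      List.filter_map, List.map_map]
  rfl

-- ===== VERDICT (by name: the statement is the Claim_ definition above) =====
theorem venditaMinA_spec : Claim_equal_venditaMinA := by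
  intro t _ hpre
  unfold Spec_venditaMinA
  exact venditaMinA_spec' t hpre
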